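-- pv_equiv track=rewrite | github.com/algezoly7/problems_solving | greedy_algorithms/grouping_children.py | num_of_groubs
-- ===== SOURCE A (Python) =====
-- def num_of_groubs(arr, max_difference):
--     arr.sort()
--     i = 0
--     last = len(arr) - 1
--     ans = []
--     while(i <= last):
--         sub_ans = []
--         j = i
--         i += 1
--         sub_ans.append(arr[j])
--         while(i <= last and arr[i] - arr[j] <= max_difference):
--             sub_ans.append(arr[i])
--             i = i+1
--         ans.append(sub_ans)
--     return(ans)
-- ===== SOURCE B (Python) =====
-- import bisect
--
-- def num_of_groubs(arr, max_difference):
--     arr.sort()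
--     groups = []
--     start = 0
--     n = len(arr)
--     while start < n:
--         end = max(start + 1, bisect.bisect_right(arr, arr[start] + max_difference))
--         groups.append(arr[start:end])
--         start = end
--     return groups
-- ===== Notes on version B (the rewrite author's own statement) =====
-- stated objective: idiomatic
-- what changed: The element-by-element inner while loop that grows each group is replaced by a single bisect.bisect_right binary search for the group's right edge (guarded by max(start+1, .) so a group always keeps its first element), and each group is emitted as one slice arr[start:end].
import Mathlib
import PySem

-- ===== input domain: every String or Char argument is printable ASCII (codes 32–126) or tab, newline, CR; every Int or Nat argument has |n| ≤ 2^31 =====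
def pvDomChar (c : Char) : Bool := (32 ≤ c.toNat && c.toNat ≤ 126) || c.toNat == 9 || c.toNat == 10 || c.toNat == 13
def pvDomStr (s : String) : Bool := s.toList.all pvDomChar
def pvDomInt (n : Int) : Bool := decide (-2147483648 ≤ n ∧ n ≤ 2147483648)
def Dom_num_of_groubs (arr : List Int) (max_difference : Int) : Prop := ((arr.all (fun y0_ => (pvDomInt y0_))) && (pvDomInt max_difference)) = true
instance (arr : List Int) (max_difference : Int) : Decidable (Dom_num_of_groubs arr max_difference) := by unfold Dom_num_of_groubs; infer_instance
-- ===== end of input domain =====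

-- B replaces A's element-by-element inner while loop by a bisect_right binary search for each
-- group's right edge and takes each group as one slice (idiomatic, same asymptotic cost).
-- Both A and B sort arr in place (same mutation); the equivalence proved is about the return value.

-- ===== PORT A =====
-- inner 'while(i <= last and arr[i] - arr[j] <= max_difference)' loop; indices are always in
-- range when called as A calls it, so arr[i] is ported as getD i.toNat 0; the Nat argument is
-- a fuel guard (always called with enough fuel for the loop to exit by its own condition).
def innerA (a : List Int) (md last j : Int) : Nat → List Int → Int → List Int × Int
  | 0, sub, i => (sub, i)
  | f + 1, sub, i =>
    if i ≤ last ∧ a.getD i.toNat 0 - a.getD j.toNat 0 ≤ md then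
      innerA a md last j f (sub ++ [a.getD i.toNat 0]) (i + 1)
    else (sub, i)

-- outer 'while(i <= last)' loop, accumulating ans (first Nat argument is the fuel guard)
def outerA (a : List Int) (md last : Int) : Nat → Int → List (List Int) → List (List Int)
  | 0, _, ans => ans
  | f + 1, i, ans =>
    if i ≤ last then
      let r := innerA a md last i a.length [a.getD i.toNat 0] (i + 1)
      outerA a md last f r.2 (ans ++ [r.1])
    else ans

def num_of_groubs (arr : List Int) (max_difference : Int) : List (List Int) :=
  let a := PySem.List.sorted arr (fun x => x) false
  outerA a max_difference ((a.length : Int) - 1) a.length 0 []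

-- ===== PORT B =====
-- 'while start < n' loop of Source B; bisect.bisect_right is PySem.List.bisectRight;
-- the first Nat argument is a fuel guard (always called with enough fuel).
def loopB (a : List Int) (md : Int) : Nat → Nat → List (List Int) → List (List Int)
  | 0, _, groups => groups
  | f + 1, start, groups =>
    if start < a.length then
      let e := max (start + 1) (PySem.List.bisectRight a (a.getD start 0 + md))
      loopB a md f e (groups ++ [PySem.List.slice a (some (start : Int)) (some (e : Int))])
    else groups

def num_of_groubs_alt (arr : List Int) (max_difference : Int) : List (List Int) :=
  let a := PySem.List.sorted arr (fun x => x) false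
  loopB a max_difference a.length 0 []

-- ===== PRECONDITION & SPEC =====
def Spec_num_of_groubs (arr : List Int) (max_difference : Int) (out : List (List Int)) : Prop := out = num_of_groubs_alt arr max_difference
instance (arr : List Int) (max_difference : Int) (out : List (List Int)) : Decidable (Spec_num_of_groubs arr max_difference out) := by unfold Spec_num_of_groubs; infer_instance

-- ===== CLAIM (what is proved, stated in full; the proofs are below) =====
def Claim_equal_num_of_groubs : Prop := ∀ (arr : List Int) (max_difference : Int), Dom_num_of_groubs arr max_difference → Spec_num_of_groubs arr max_difference (num_of_groubs arr max_difference)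

-- ===== LEMMAS AND PROOFS =====

-- takeWhile is take k once all indices below k pass and index k (if any) fails
theorem takeWhile_eq_take_of (p : Int → Bool) (xs : List Int) (k : Nat)
    (hk : k ≤ xs.length)
    (h1 : ∀ j (hj : j < xs.length), j < k → p xs[j])
    (h2 : ∀ (hj : k < xs.length), ¬ p xs[k]) :
    xs.takeWhile p = xs.take k := by
  induction xs generalizing k with
  | nil => simp
  | cons x xs ih =>
    cases k with
    | zero =>
      have := h2 (by simp)
      simp_all [List.takeWhile]
    | succ k =>
      have hx : p x := h1 0 (by simp) (by omega)
      simp only [List.takeWhile, hx, List.take_succ_cons]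
      congr 1
      exact ih k (by simpa using hk)
        (fun j hj hjk => h1 (j+1) (by simpa using hj) (by omega))
        (fun hj => h2 (by simpa using hj))

theorem takeWhile_append_all (p : Int → Bool) (l1 l2 : List Int)
    (h : ∀ x ∈ l1, p x) : (l1 ++ l2).takeWhile p = l1 ++ l2.takeWhile p := by
  induction l1 with
  | nil => simp
  | cons x l ih =>
    have hx : p x := h x (by simp)
    simp only [List.cons_append, List.takeWhile_cons, hx, if_true]
    rw [ih (fun y hy => h y (by simp [hy]))]

theorem take_len_takeWhile (p : Int → Bool) (l : List Int) :
    l.take (l.takeWhile p).length = l.takeWhile p := by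
  induction l with
  | nil => simp
  | cons x l ih => by_cases hx : p x <;> simp [hx, ih]

theorem bisect_eq_takeWhile_len (a : List Int) (t : Int)
    (hp : a.Pairwise (· ≤ ·)) :
    PySem.List.bisectRight a t = (a.takeWhile (fun v => decide (v ≤ t))).length := by
  obtain ⟨hle, h1, h2⟩ := PySem.List.bisectRight_spec a t hp
  rw [takeWhile_eq_take_of _ a (PySem.List.bisectRight a t) hle
      (fun j hj hjk => by simpa using h1 j hj hjk)
      (fun hj => by simpa using h2 _ hj le_rfl)]
  simp [List.length_take]
  omega

-- monotonicity of a sorted list by indices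
theorem sorted_getElem_mono (a : List Int) (hp : a.Pairwise (· ≤ ·))
    (j k : Nat) (hj : j < a.length) (hk : k < a.length) (hjk : j ≤ k) :
    a[j] ≤ a[k] := by
  rcases Nat.lt_or_ge j k with h | h
  · exact (List.pairwise_iff_getElem.mp hp) j k hj hk h
  · have : j = k := by omega
    subst this; exact le_rfl

-- the group boundary B computes equals the index where A's inner scan stops
theorem bisect_max_eq (a : List Int) (md : Int) (hp : a.Pairwise (· ≤ ·))
    (i : Nat) (hi : i < a.length) :
    max (i + 1) (PySem.List.bisectRight a (a[i] + md)) =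
      i + 1 + ((a.drop (i+1)).takeWhile (fun v => decide (v ≤ a[i] + md))).length := by
  rw [bisect_eq_takeWhile_len a (a[i] + md) hp]
  set p : Int → Bool := fun v => decide (v ≤ a[i] + md) with hpdef
  by_cases h0 : a[i] ≤ a[i] + md
  · -- every element of the first i+1 positions passes p, so takeWhile splits at i+1
    have hall : ∀ x ∈ a.take (i+1), p x := by
      intro x hx
      obtain ⟨j, hj, rfl⟩ := List.mem_iff_getElem.mp hx
      have hj' : j < a.length := by
        have := List.length_take_le (i+1) a; omega
      have hji : j ≤ i := by
        have : j < min (i+1) a.length := by simpa using hj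
        omega
      have : (a.take (i+1))[j] = a[j]'hj' := List.getElem_take
      rw [this, hpdef]
      exact decide_eq_true (le_trans (sorted_getElem_mono a hp j i hj' hi hji) h0)
    have hsplit : a.takeWhile p = a.take (i+1) ++ (a.drop (i+1)).takeWhile p := by
      conv_lhs => rw [← List.take_append_drop (i+1) a]
      exact takeWhile_append_all p _ _ hall
    rw [hsplit]
    have hlen : (a.take (i+1)).length = i + 1 := by simp; omega
    simp [hlen]
  · -- max_difference < 0: the binary search lands at or before i, the guard keeps i+1
    have hklei : (a.takeWhile p).length ≤ i := by
      by_contra hgt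
      have hk : i < (a.takeWhile p).length := by omega
      have hpref := List.takeWhile_prefix (l := a) p
      have hgetEq : (a.takeWhile p)[i]'hk = a[i] := hpref.getElem hk
      have hmem : (a.takeWhile p)[i]'hk ∈ a.takeWhile p := List.getElem_mem hk
      have hpi := List.mem_takeWhile_imp hmem
      rw [hgetEq, hpdef] at hpi
      simp at hpi
      omega
    have hL0 : ((a.drop (i+1)).takeWhile p).length = 0 := by
      by_cases hlen : i + 1 < a.length
      · have hdrop : a.drop (i+1) = a[i+1] :: a.drop (i+2) := List.drop_eq_getElem_cons hlen
        have hfail : p a[i+1] = false := by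
          rw [hpdef]
          simp only [decide_eq_false_iff_not]
          have := sorted_getElem_mono a hp i (i+1) hi hlen (by omega)
          omega
        rw [hdrop, List.takeWhile_cons, hfail]
        simp
      · rw [List.drop_eq_nil_of_le (by omega)]
        simp
    omega

-- A's inner loop appends exactly the takeWhile-segment of the suffix at i
theorem innerA_eq (a : List Int) (md j : Int) (f : Nat) (sub : List Int) (i : Int)
    (hi : 0 ≤ i) (hF : a.length ≤ i.toNat + f) :
    innerA a md ((a.length : Int) - 1) j f sub i =
      (sub ++ (a.drop i.toNat).takeWhile (fun v => decide (v - a.getD j.toNat 0 ≤ md)),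
       i + ((a.drop i.toNat).takeWhile (fun v => decide (v - a.getD j.toNat 0 ≤ md))).length) := by
  induction f generalizing sub i with
  | zero =>
    have hnil : a.drop i.toNat = [] := List.drop_eq_nil_of_le (by omega)
    simp [innerA, hnil]
  | succ f ih =>
    rw [innerA]
    by_cases h : i ≤ (a.length : Int) - 1 ∧ a.getD i.toNat 0 - a.getD j.toNat 0 ≤ md
    · rw [if_pos h]
      have hlt : i.toNat < a.length := by omega
      have hdrop : a.drop i.toNat = a[i.toNat] :: a.drop (i.toNat + 1) :=
        List.drop_eq_getElem_cons hlt
      have hget : a.getD i.toNat 0 = a[i.toNat] := List.getD_eq_getElem a 0 hlt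
      have hcond : (decide (a[i.toNat] - a.getD j.toNat 0 ≤ md)) = true := by
        rw [← hget]; exact decide_eq_true h.2
      rw [hdrop]
      simp only [List.takeWhile_cons, hcond, if_true]
      have htn : (i + 1).toNat = i.toNat + 1 := by omega
      rw [ih _ _ (by omega) (by omega)]
      rw [htn, hget]
      simp only [Prod.mk.injEq, List.length_cons]
      refine ⟨by simp, by push_cast; omega⟩
    · rw [if_neg h]
      rcases Classical.em (i ≤ (a.length : Int) - 1) with hle | hgt
      · have hlt : i.toNat < a.length := by omega
        have hcond : a.getD i.toNat 0 - a.getD j.toNat 0 ≤ md → False := by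
          intro hc; exact h ⟨hle, hc⟩
        have hdrop : a.drop i.toNat = a[i.toNat] :: a.drop (i.toNat + 1) :=
          List.drop_eq_getElem_cons hlt
        have hget : a.getD i.toNat 0 = a[i.toNat] := List.getD_eq_getElem a 0 hlt
        have hc : (decide (a[i.toNat] - a.getD j.toNat 0 ≤ md)) = false := by
          simp only [← hget, decide_eq_false_iff_not]; exact hcond
        rw [hdrop, List.takeWhile_cons, hc]
        simp
      · have : a.drop i.toNat = [] := List.drop_eq_nil_of_le (by omega)
        simp [this]

theorem outer_eq (a : List Int) (md : Int) (hp : a.Pairwise (· ≤ ·)) :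
    ∀ (f g : Nat) (i : Int) (ans : List (List Int)), 0 ≤ i →
      a.length ≤ i.toNat + f → a.length ≤ i.toNat + g →
      outerA a md ((a.length : Int) - 1) f i ans = loopB a md g i.toNat ans := by
  intro f
  induction f with
  | zero =>
    intro g i ans hi hf hg
    cases g with
    | zero => rw [outerA, loopB]
    | succ g => rw [outerA, loopB, if_neg (by omega)]
  | succ f ih =>
    intro g i ans hi hf hg
    by_cases hlt : i.toNat < a.length
    · cases g with
      | zero => omega
      | succ g =>
        rw [outerA, loopB, if_pos (by omega), if_pos hlt]
        have hIE := innerA_eq a md i a.length [a.getD i.toNat 0] (i + 1)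
          (by omega) (by omega)
        have htn : (i + 1).toNat = i.toNat + 1 := by omega
        rw [htn] at hIE
        have hget : a.getD i.toNat 0 = a[i.toNat] := List.getD_eq_getElem a 0 hlt
        have hfun : (fun v => decide (v - a.getD i.toNat 0 ≤ md)) =
            (fun v => decide (v ≤ a[i.toNat] + md)) := by
          funext v; rw [hget]; exact decide_eq_decide.mpr (by omega)
        rw [hfun] at hIE
        set tw := (a.drop (i.toNat + 1)).takeWhile (fun v => decide (v ≤ a[i.toNat] + md)) with htw
        have hbm := bisect_max_eq a md hp i.toNat hlt
        have he : max (i.toNat + 1) (PySem.List.bisectRight a (a.getD i.toNat 0 + md)) =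
            i.toNat + 1 + tw.length := by
          rw [hget]; exact hbm
        have hslice : PySem.List.slice a (some ((i.toNat : Nat) : Int))
            (some ((i.toNat + 1 + tw.length : Nat) : Int)) = a.getD i.toNat 0 :: tw := by
          rw [PySem.List.slice_natCast]
          have hsub : (i.toNat + 1 + tw.length) - i.toNat = tw.length + 1 := by omega
          rw [hsub, List.drop_eq_getElem_cons hlt, List.take_succ_cons, htw,
            take_len_takeWhile, hget]
        simp only [hIE, he, hslice]
        have hnext : ((i + 1) + (tw.length : Int)).toNat = i.toNat + 1 + tw.length := by omega
        rw [← hnext]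
        exact ih g ((i + 1) + (tw.length : Int)) _ (by omega) (by omega) (by omega)
    · cases g with
      | zero => rw [outerA, loopB, if_neg (by omega)]
      | succ g => rw [outerA, loopB, if_neg (by omega), if_neg (by omega)]

-- ===== VERDICT (by name: the statement is the Claim_ definition above) =====
theorem num_of_groubs_spec : Claim_equal_num_of_groubs := by
  intro arr md _
  unfold Spec_num_of_groubs num_of_groubs num_of_groubs_alt
  have hp : (PySem.List.sorted arr (fun x => x) false).Pairwise (· ≤ ·) :=
    PySem.List.sorted_pairwise arr (fun x => x)
  simpa using outer_eq (PySem.List.sorted arr (fun x => x) false) md hp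
    (PySem.List.sorted arr (fun x => x) false).length
    (PySem.List.sorted arr (fun x => x) false).length 0 [] le_rfl (by omega) (by omega)
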